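-- pv_equiv track=rewrite | github.com/1DanielSC/BinarySearchTree | src/main.py | read_instruction
-- ===== SOURCE A (Python) =====
-- def read_instruction(fileLine):
--
--     delim = " "
--     instruction = ""
--     number = ""
--     flag = False
--
--     for character in fileLine:
--         if(character == '\n'):
--             break
--
--         elif(character == delim):
--            flag = True
--
--         elif(not flag):
--            instruction += character
--         elif(flag):
--             number += character
--
--
--     if(len(number) == 0):
--         return (instruction,None)
--     else:
--         return (instruction,int(number))
-- ===== SOURCE B (Python) =====
-- def read_instruction(fileLine):
--     line = fileLine.split('\n')[0]
--     parts = line.split(' ')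
--     number = ''.join(parts[1:])
--     if number == '':
--         return (parts[0], None)
--     return (parts[0], int(number))
-- ===== Notes on version B (the rewrite author's own statement) =====
-- stated objective: simpler
-- what changed: Replaced the per-character flag state machine with library tokenization: take the text before the first newline, split it on the space character, keep the first token as the instruction and join the remaining tokens (with the empty separator) as the number string.
import Mathlib
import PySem

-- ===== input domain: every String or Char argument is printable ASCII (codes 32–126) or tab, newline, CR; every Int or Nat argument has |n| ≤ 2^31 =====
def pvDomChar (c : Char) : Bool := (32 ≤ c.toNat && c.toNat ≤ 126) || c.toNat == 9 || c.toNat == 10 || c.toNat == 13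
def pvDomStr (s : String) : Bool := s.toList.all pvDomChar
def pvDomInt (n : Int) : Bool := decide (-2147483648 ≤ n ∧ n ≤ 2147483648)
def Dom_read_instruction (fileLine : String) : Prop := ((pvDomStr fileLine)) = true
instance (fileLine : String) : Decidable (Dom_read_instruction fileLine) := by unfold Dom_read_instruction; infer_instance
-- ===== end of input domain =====

-- B replaces A's per-character flag state machine by split-based tokenization (objective: simpler).

-- ===== PORT A =====
-- the for-loop with its (instruction, number, flag) state and the '\n' break
def readLoopA : List Char → List Char → List Char → Bool → List Char × List Char
  | [], instruction, number, _flag => (instruction, number)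
  | character :: rest, instruction, number, flag =>
    if character = '\n' then (instruction, number)
    else if character = ' ' then readLoopA rest instruction number true
    else if !flag then readLoopA rest (instruction ++ [character]) number flag
    else readLoopA rest instruction (number ++ [character]) flag

def read_instruction (fileLine : String) : String × Option Int :=
  let st := readLoopA fileLine.toList [] [] false
  if st.2.length = 0 then (String.ofList st.1, none)
  else (String.ofList st.1, PySem.Int.ofChars? st.2)   -- int(number); none = ValueError, excluded by Pre_

-- ===== PORT B =====
def read_instruction_alt (fileLine : String) : String × Option Int :=
  let line := (PySem.List.pyGet? (PySem.Chars.splitOn fileLine.toList ['\n']) 0).getD []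
  let parts := PySem.Chars.splitOn line [' ']
  let instruction := (PySem.List.pyGet? parts 0).getD []
  let number := PySem.Chars.join [] parts.tail   -- ''.join(parts[1:])
  if number = [] then (String.ofList instruction, none)
  else (String.ofList instruction, PySem.Int.ofChars? number)   -- int(number); none = ValueError, excluded by Pre_

-- ===== PRECONDITION & SPEC =====
-- the number characters of the line (after the first space, spaces removed), independent of either port
def pvNumChars (fileLine : String) : List Char :=
  ((fileLine.toList.takeWhile (· ≠ '\n')).dropWhile (· ≠ ' ')).filter (· ≠ ' ')

-- Pre_ excludes exactly the inputs on which A's int(number) raises ValueError (B raises there too)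
def Pre_read_instruction (fileLine : String) : Prop :=
  pvNumChars fileLine = [] ∨ (PySem.Int.ofChars? (pvNumChars fileLine)).isSome = true
instance (fileLine : String) : Decidable (Pre_read_instruction fileLine) := by
  unfold Pre_read_instruction; infer_instance

def pvWitness_read_instruction : String := "insert 42\n"

def Spec_read_instruction (fileLine : String) (out : String × Option Int) : Prop :=
  out = read_instruction_alt fileLine
instance (fileLine : String) (out : String × Option Int) : Decidable (Spec_read_instruction fileLine out) := by
  unfold Spec_read_instruction; infer_instance

-- ===== CLAIM (what is proved, stated in full; the proofs are below) =====
def Claim_equal_read_instruction : Prop :=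
  ∀ (fileLine : String), Dom_read_instruction fileLine → Pre_read_instruction fileLine →
    Spec_read_instruction fileLine (read_instruction fileLine)

-- ===== LEMMAS AND PROOFS =====

-- simple recursive specification of str.split with a one-character separator
def pvSp (c : Char) : List Char → List (List Char)
  | [] => [[]]
  | d :: rest => if d = c then [] :: pvSp c rest else (pvSp c rest).modifyHead (d :: ·)

theorem pvSp_ne_nil (c : Char) : ∀ cs, pvSp c cs ≠ []
  | [] => by simp [pvSp]
  | d :: rest => by
    simp only [pvSp]
    split_ifs
    · simp
    · cases h : pvSp c rest with
      | nil => exact absurd h (pvSp_ne_nil c rest)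
      | cons a t => simp [h, List.modifyHead]

theorem pred_ne (c : Char) : (fun x => !decide (x = c)) = (fun x : Char => decide (x ≠ c)) := by
  funext x; simp [decide_not]

theorem go_spec (c : Char) : ∀ (fuel : Nat) (l cur : List Char) (acc : List (List Char)),
    l.length < fuel →
    PySem.Chars.splitOn.go [c] fuel l cur acc
      = acc.reverse ++ (pvSp c l).modifyHead (cur.reverse ++ ·)
  | 0, l, cur, acc, h => by omega
  | fuel + 1, [], cur, acc, _ => by
    simp [PySem.Chars.splitOn.go, pvSp]
  | fuel + 1, d :: rest, cur, acc, h => by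
    by_cases hd : d = c
    · have : ([c].isPrefixOf (d :: rest)) = true := by simp [List.isPrefixOf, hd]
      rw [PySem.Chars.splitOn.go]
      simp only [this, if_true, List.length_cons, List.length_nil, List.drop_succ_cons,
        List.drop_zero]
      rw [go_spec c fuel rest [] (cur.reverse :: acc) (by simpa using Nat.lt_of_succ_lt_succ h)]
      cases hsp : pvSp c rest with
      | nil => exact absurd hsp (pvSp_ne_nil c rest)
      | cons a t => simp [pvSp, hd, hsp, List.modifyHead]
    · have : ([c].isPrefixOf (d :: rest)) = false := by
        simpa [List.isPrefixOf] using fun h => hd h.symm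
      rw [PySem.Chars.splitOn.go]
      simp only [this, Bool.false_eq_true, if_false]
      rw [go_spec c fuel rest (d :: cur) acc (by simpa using Nat.lt_of_succ_lt_succ h)]
      cases hsp : pvSp c rest with
      | nil => exact absurd hsp (pvSp_ne_nil c rest)
      | cons a t => simp [pvSp, hd, hsp, List.modifyHead]

theorem splitOn_single (c : Char) (cs : List Char) :
    PySem.Chars.splitOn cs [c] = pvSp c cs := by
  rw [PySem.Chars.splitOn, go_spec c (cs.length + 1) cs [] [] (by omega)]
  cases hsp : pvSp c cs with
  | nil => exact absurd hsp (pvSp_ne_nil c cs)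
  | cons a t => simp [List.modifyHead]

theorem headD_pvSp (c : Char) : ∀ cs : List Char,
    (pvSp c cs).headD [] = cs.takeWhile (· ≠ c)
  | [] => by simp [pvSp]
  | d :: rest => by
    by_cases hd : d = c
    · simp [pvSp, hd, List.takeWhile]
    · cases hsp : pvSp c rest with
      | nil => exact absurd hsp (pvSp_ne_nil c rest)
      | cons a t =>
        have ih := headD_pvSp c rest
        rw [hsp] at ih
        simp only [pvSp, hd, if_false, hsp, List.modifyHead, List.headD, List.takeWhile]
        have ha : a = List.takeWhile (fun x => decide (x ≠ c)) rest := by simpa using ih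
        simp [hd]
        rw [pred_ne]
        exact ha

theorem flatten_pvSp (c : Char) : ∀ cs : List Char,
    (pvSp c cs).flatten = cs.filter (· ≠ c)
  | [] => by simp [pvSp]
  | d :: rest => by
    by_cases hd : d = c
    · simpa [pvSp, hd] using flatten_pvSp c rest
    · cases hsp : pvSp c rest with
      | nil => exact absurd hsp (pvSp_ne_nil c rest)
      | cons a t =>
        have ih := flatten_pvSp c rest
        rw [hsp] at ih
        simp only [pvSp, hd, if_false, hsp, List.modifyHead, List.flatten_cons, List.filter]
        have ha : a ++ t.flatten = List.filter (fun x => decide (x ≠ c)) rest := by simpa using ih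
        simp [hd]
        rw [pred_ne]
        exact ha

theorem flatten_tail_pvSp (c : Char) : ∀ cs : List Char,
    (pvSp c cs).tail.flatten = (cs.dropWhile (· ≠ c)).filter (· ≠ c)
  | [] => by simp [pvSp]
  | d :: rest => by
    by_cases hd : d = c
    · simp [pvSp, hd, List.dropWhile, flatten_pvSp, List.filter]
    · cases hsp : pvSp c rest with
      | nil => exact absurd hsp (pvSp_ne_nil c rest)
      | cons a t =>
        have ih := flatten_tail_pvSp c rest
        rw [hsp] at ih
        simp only [pvSp, hd, if_false, hsp, List.modifyHead, List.dropWhile]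
        simpa [hd] using ih

theorem join_nil_eq_flatten (parts : List (List Char)) :
    PySem.Chars.join [] parts = parts.flatten := by
  induction parts with
  | nil => simp [PySem.Chars.join, List.intercalate]
  | cons a t ih => cases t <;> simp_all [PySem.Chars.join, List.intercalate, List.intersperse]

-- A's loop only sees the part before the first '\n'
theorem readLoopA_takeWhile : ∀ (cs instr num : List Char) (flag : Bool),
    readLoopA cs instr num flag = readLoopA (cs.takeWhile (· ≠ '\n')) instr num flag
  | [], _, _, _ => by simp
  | d :: rest, instr, num, flag => by
    by_cases hd : d = '\n'
    · simp [readLoopA, hd, List.takeWhile]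
    · cases flag <;>
      · by_cases hs : d = ' ' <;>
          simp [readLoopA, hd, hs, List.takeWhile, readLoopA_takeWhile rest]

-- the loop on a newline-free list, both flag values at once
theorem readLoopA_spec : ∀ (cs instr num : List Char), '\n' ∉ cs →
    readLoopA cs instr num true = (instr, num ++ cs.filter (· ≠ ' ')) ∧
    readLoopA cs instr num false
      = (instr ++ cs.takeWhile (· ≠ ' '), num ++ (cs.dropWhile (· ≠ ' ')).filter (· ≠ ' '))
  | [], instr, num, _ => by simp [readLoopA]
  | d :: rest, instr, num, h => by
    have hd : d ≠ '\n' := by simp at h; tauto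
    have hrest : '\n' ∉ rest := by simp at h; tauto
    by_cases hs : d = ' '
    · constructor
      · rw [readLoopA]
        simp only [hd, if_false, hs, if_pos rfl]
        rw [(readLoopA_spec rest instr num hrest).1]
        simp [hs, List.filter]
      · rw [readLoopA]
        simp only [hd, if_false, hs, if_pos rfl]
        rw [(readLoopA_spec rest instr num hrest).1]
        simp [hs, List.takeWhile, List.dropWhile, List.filter]
    · constructor
      · rw [readLoopA]
        simp only [hd, if_false, hs, if_neg hs, Bool.not_true, Bool.false_eq_true, if_false]
        rw [(readLoopA_spec rest instr (num ++ [d]) hrest).1]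
        simp [hs, List.filter]
      · rw [readLoopA]
        simp only [hd, if_false, hs, if_neg hs, Bool.not_false, if_pos rfl]
        rw [(readLoopA_spec rest (instr ++ [d]) num hrest).2]
        simp [hs, List.takeWhile, List.dropWhile]

theorem not_newline_takeWhile (cs : List Char) : '\n' ∉ cs.takeWhile (· ≠ '\n') := by
  intro h
  have := List.mem_takeWhile_imp h
  simp at this

theorem pyGet?_zero_getD (l : List (List Char)) (h : l ≠ []) :
    (PySem.List.pyGet? l 0).getD [] = l.headD [] := by
  cases l with
  | nil => exact absurd rfl h
  | cons a t => simp [PySem.List.pyGet?, PySem.List.pyIdx?]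

theorem pyGet?_sp (c : Char) (cs : List Char) :
    (PySem.List.pyGet? (pvSp c cs) 0).getD [] = cs.takeWhile (· ≠ c) := by
  rw [pyGet?_zero_getD _ (pvSp_ne_nil _ _), headD_pvSp]

-- ===== VERDICT (by name: the statement is the Claim_ definition above) =====
theorem read_instruction_spec : Claim_equal_read_instruction := by
  intro fileLine _hdom _hpre
  unfold Spec_read_instruction read_instruction read_instruction_alt
  rw [readLoopA_takeWhile]
  rw [(readLoopA_spec _ [] [] (not_newline_takeWhile _)).2]
  simp only [splitOn_single, pyGet?_sp, join_nil_eq_flatten, flatten_tail_pvSp]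
  simp [List.length_eq_zero_iff]
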